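-- pv_equiv track=rewrite | github.com/PauloMorillo/holbertonschool-machine_learning | supervised_learning/0x10-nlp_metrics/1-ngram_bleu.py | transform_grams
-- ===== SOURCE A (Python) =====
-- def grams(sentence, n):
--     """
--     getting grams
--     """
--     new = []
--     ln = len(sentence)
--     for i, word in enumerate(sentence):
--         s = word
--         counter = 0
--         j = 1
--         for j in range(1, n):
--             if ln > i + j:
--                 s += " " + sentence[i + j]
--                 counter += 1
--         if counter == j:
--             new.append(s)
--     return new
--
-- def transform_grams(references, sentence, n):
--     """
--     transform grams
--     """
--     if n == 1:
--         return references, sentence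
--     new_sentence = grams(sentence, n)
--     new_ref = []
--     for ref in references:
--         new_r = grams(ref, n)
--         new_ref.append(new_r)
--
--     return new_ref, new_sentence
-- ===== SOURCE B (Python) =====
-- def grams(sentence, n):
--     """All length-n windows joined by spaces, via the zip-of-shifted-slices idiom."""
--     if n < 1 or n > len(sentence):
--         return []
--     return [" ".join(t) for t in zip(*(sentence[i:] for i in range(n)))]
--
-- def transform_grams(references, sentence, n):
--     if n == 1:
--         return references, sentence
--     return [grams(ref, n) for ref in references], grams(sentence, n)
-- ===== Notes on version B (the rewrite author's own statement) =====
-- stated objective: idiomatic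
-- what changed: grams's index loop with the incremental string concatenation and the counter==j guard is replaced by the zip-of-shifted-slices idiom (' '.join over zip(*(sentence[i:] for i in range(n)))) with an early [] when no length-n window exists; transform_grams maps it over references with comprehensions instead of an append loop.
import Mathlib
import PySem

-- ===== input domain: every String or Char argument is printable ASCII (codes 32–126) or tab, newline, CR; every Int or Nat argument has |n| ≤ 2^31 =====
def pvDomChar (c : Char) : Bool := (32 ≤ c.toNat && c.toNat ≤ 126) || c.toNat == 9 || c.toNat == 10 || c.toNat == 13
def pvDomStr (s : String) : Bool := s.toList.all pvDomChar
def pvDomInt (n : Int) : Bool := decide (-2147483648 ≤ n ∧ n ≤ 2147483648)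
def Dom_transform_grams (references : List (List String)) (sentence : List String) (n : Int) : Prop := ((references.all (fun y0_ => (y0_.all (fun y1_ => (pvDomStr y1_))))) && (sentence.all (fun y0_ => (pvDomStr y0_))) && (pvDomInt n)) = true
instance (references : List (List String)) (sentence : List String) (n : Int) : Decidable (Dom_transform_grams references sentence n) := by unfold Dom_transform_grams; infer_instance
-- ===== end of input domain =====

-- B replaces A's index-and-counter window loop by the zip-of-shifted-slices idiom (objective: idiomatic; same cost).

-- ===== PORT A =====
-- grams: A's index loop with the counter guard, transliterated (inner loop state = (s, counter, j);
-- the guard 'ln > i + j' ensures the index i+j is in range, so pyGetD's default is never used)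
def gramsA (sentence : List String) (n : Int) : List String :=
  let ln : Int := PySem.List.len sentence
  (PySem.List.enumerate sentence).foldl (fun new iw =>
    let st := (PySem.List.pyRange 1 n 1).foldl
      (fun (st : String × Int × Int) jj =>
        if ln > iw.1 + jj then
          (st.1 ++ " " ++ PySem.List.pyGetD sentence (iw.1 + jj) "", st.2.1 + 1, jj)
        else (st.1, st.2.1, jj))
      (iw.2, 0, 1)
    if st.2.1 = st.2.2 then new ++ [st.1] else new) []

def transform_grams (references : List (List String)) (sentence : List String) (n : Int) : List (List String) × List String :=
  if n == 1 then (references, sentence)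
  else
    let new_sentence := gramsA sentence n
    let new_ref := references.foldl (fun acc ref => acc ++ [gramsA ref n]) []
    (new_ref, new_sentence)

-- ===== PORT B =====
-- hand port of Python's zip(*iterables) over lists of strings (exact: yields the tuple of heads
-- while every iterable is nonempty, and nothing at all when there are no iterables)
def zipAll (ls : List (List String)) : List (List String) :=
  if _h : ls ≠ [] ∧ ls.all (fun l => !l.isEmpty) then
    ls.map (fun l => l.headD "") :: zipAll (ls.map List.tail)
  else []
termination_by (ls.headD []).length
decreasing_by
  cases ls with
  | nil => simp at _h
  | cons a t =>
    have : a ≠ [] := by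
      have := _h.2; simp [List.all_cons] at this; simpa using this.1
    simp [List.headD]
    cases a with
    | nil => simp at this
    | cons x xs => simp

-- grams via ' '.join over the zip of the n shifted slices (early [] when no window exists)
def gramsB (sentence : List String) (n : Int) : List String :=
  if n < 1 ∨ n > PySem.List.len sentence then []
  else
    (zipAll ((PySem.List.pyRange 0 n 1).map
        (fun i => PySem.List.slice sentence (some i) none))).map
      (fun t => PySem.Str.join " " t)

def transform_grams_alt (references : List (List String)) (sentence : List String) (n : Int) : List (List String) × List String :=
  if n == 1 then (references, sentence)
  else (references.map (fun ref => gramsB ref n), gramsB sentence n)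

-- ===== PRECONDITION & SPEC =====
def Spec_transform_grams (references : List (List String)) (sentence : List String) (n : Int) (out : List (List String) × List String) : Prop := out = transform_grams_alt references sentence n
instance (references : List (List String)) (sentence : List String) (n : Int) (out : List (List String) × List String) : Decidable (Spec_transform_grams references sentence n out) := by unfold Spec_transform_grams; infer_instance

-- ===== CLAIM (what is proved, stated in full; the proofs are below) =====
def Claim_equal_transform_grams : Prop := ∀ (references : List (List String)) (sentence : List String) (n : Int), Dom_transform_grams references sentence n → Spec_transform_grams references sentence n (transform_grams references sentence n)

-- ===== LEMMAS AND PROOFS =====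

-- ' '.join(w :: rest) is the incremental appending A performs
lemma join_eq_foldl (w : String) (rest : List String) :
    rest.foldl (fun a x => a ++ " " ++ x) w = PySem.Str.join " " (w :: rest) := by
  induction rest generalizing w with
  | nil =>
    apply String.toList_inj.mp
    simp [PySem.Str.toList_join, PySem.Chars.join_singleton]
  | cons x xs ih =>
    rw [List.foldl_cons, ih]
    apply String.toList_inj.mp
    cases xs with
    | nil => simp [PySem.Str.toList_join, PySem.Chars.join_singleton, PySem.Chars.join_cons_cons]
    | cons y ys => simp [PySem.Str.toList_join, PySem.Chars.join_cons_cons]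

-- heads of the first k shifted copies of s = take k
lemma heads_drops (s : List String) (k : Nat) (hk : k ≤ s.length) :
    (List.range k).map (fun i => (s.drop i).headD "") = s.take k := by
  apply List.ext_getElem
  · simp; omega
  · intro j h1 h2
    simp only [List.getElem_map, List.getElem_range, List.getElem_take]
    have hj : j < s.length := by simp at h1; omega
    rw [List.headD_eq_head?_getD, List.head?_drop]
    simp [hj]

-- zip of the k shifted copies of s = the length-k windows of s
lemma zipAll_drops (s : List String) (k : Nat) (hk : 1 ≤ k) :
    zipAll ((List.range k).map (fun i => s.drop i)) =
      (List.range (s.length - (k - 1))).map (fun t => (s.drop t).take k) := by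
  induction s with
  | nil =>
    rw [zipAll]
    have h1 : ¬ (((List.range k).map (fun i => (([] : List String)).drop i)) ≠ [] ∧
        ((List.range k).map (fun i => (([] : List String)).drop i)).all (fun l => !l.isEmpty)) := by
      intro ⟨hne, hall⟩
      have h0 : (0:Nat) < k := hk
      have hmem : (([] : List String)).drop 0 ∈ (List.range k).map (fun i => (([] : List String)).drop i) :=
        List.mem_map.mpr ⟨0, by simpa using h0, rfl⟩
      have := List.all_eq_true.mp hall _ hmem
      simp at this
    rw [dif_neg h1]
    simp
  | cons x tl ih =>
    by_cases hlen : k ≤ tl.length + 1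
    · rw [zipAll]
      have hne : ((List.range k).map (fun i => (x :: tl).drop i)) ≠ [] := by
        simp; omega
      have hall : ((List.range k).map (fun i => (x :: tl).drop i)).all (fun l => !l.isEmpty) = true := by
        simp only [List.all_map, List.all_eq_true]
        intro i hi
        simp only [List.mem_range] at hi
        simp [List.drop_eq_nil_iff]
        omega
      rw [dif_pos ⟨hne, hall⟩]
      rw [List.map_map, List.map_map]
      have htails : ((List.range k).map (List.tail ∘ fun i => (x :: tl).drop i)) =
          (List.range k).map (fun i => tl.drop i) := by
        apply List.map_congr_left
        intro i _
        simp [List.tail_drop]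
      rw [htails, ih]
      have hheads : ((List.range k).map ((fun l => l.headD "") ∘ fun i => (x :: tl).drop i)) =
          (x :: tl).take k := heads_drops _ _ hlen
      rw [hheads]
      have hlen1 : (x :: tl).length - (k - 1) = (tl.length - (k - 1)) + 1 := by simp; omega
      rw [hlen1, List.range_succ_eq_map, List.map_cons, List.map_map]
      simp only [List.drop_zero]
      rfl
    · rw [zipAll]
      have h1 : ¬ (((List.range k).map (fun i => (x :: tl).drop i)) ≠ [] ∧
          ((List.range k).map (fun i => (x :: tl).drop i)).all (fun l => !l.isEmpty)) := by
        intro ⟨hne, hall⟩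
        have hmem : (x :: tl).drop (k-1) ∈ (List.range k).map (fun i => (x :: tl).drop i) :=
          List.mem_map.mpr ⟨k-1, by simp; omega, rfl⟩
        have := List.all_eq_true.mp hall _ hmem
        simp [List.drop_eq_nil_iff] at this
        omega
      rw [dif_neg h1]
      have h2 : (x :: tl).length - (k - 1) = 0 := by simp; omega
      rw [h2]
      simp

-- A's inner loop (over range(1, n), m = n-1 iterations) in closed form
lemma innerA_closed (s : List String) (i : Nat) (m : Nat) (w : String) :
    ((List.range m).map (fun (t : Nat) => (1 : Int) + (t : Int))).foldl
      (fun (st : String × Int × Int) jj =>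
        if (PySem.List.len s : Int) > (i : Int) + jj then
          (st.1 ++ " " ++ PySem.List.pyGetD s ((i : Int) + jj) "", st.2.1 + 1, jj)
        else (st.1, st.2.1, jj))
      (w, 0, 1) =
    ( ((s.drop (i+1)).take (min m (s.length - 1 - i))).foldl (fun a x => a ++ " " ++ x) w,
      ((min m (s.length - 1 - i) : Nat) : Int),
      if m = 0 then 1 else (m : Int) ) := by
  induction m with
  | zero => simp
  | succ m ih =>
    rw [List.range_succ, List.map_append, List.foldl_append, ih]
    simp only [List.map_cons, List.map_nil, List.foldl_cons, List.foldl_nil]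
    by_cases h : i + 1 + m < s.length
    · have hg : (PySem.List.len s : Int) > (i : Int) + ((1 : Int) + (m : Nat)) := by
        simp only [PySem.List.len_eq]; omega
      rw [if_pos hg]
      have hmin1 : min (m+1) (s.length - 1 - i) = m + 1 := by omega
      have hmin0 : min m (s.length - 1 - i) = m := by omega
      have hcast : (i : Int) + ((1 : Int) + (m : Nat)) = ((i + 1 + m : Nat) : Int) := by push_cast; ring
      have hget : PySem.List.pyGetD s ((i : Int) + ((1 : Int) + (m : Nat))) "" = s[i+1+m] := by
        rw [hcast, PySem.List.pyGetD_natCast, List.getD_eq_getElem?_getD, List.getElem?_eq_getElem h]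
        rfl
      have hm' : m < (s.drop (i+1)).length := by simp; omega
      have htake : (s.drop (i+1)).take (m+1) = (s.drop (i+1)).take m ++ [s[i+1+m]] := by
        rw [List.take_add_one, List.getElem?_eq_getElem hm']
        simp [List.getElem_drop]
      rw [hmin0, hmin1, htake, List.foldl_append]
      simp only [List.foldl_cons, List.foldl_nil, hget]
      refine Prod.ext rfl (Prod.ext ?_ ?_)
      · simp
      · simp
        ring
    · have hg : ¬ ((PySem.List.len s : Int) > (i : Int) + ((1 : Int) + (m : Nat))) := by
        simp only [PySem.List.len_eq]; omega
      rw [if_neg hg]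
      have hmin : min (m+1) (s.length - 1 - i) = min m (s.length - 1 - i) := by omega
      rw [hmin]
      refine Prod.ext rfl (Prod.ext rfl ?_)
      simp
      ring

-- A's outer loop over the first L words, in closed form
lemma outerA_closed (s : List String) (m : Nat) (hm1 : 1 ≤ m) (L : Nat) (hL : L ≤ s.length) (acc : List String) :
    List.foldl (fun new (i : Nat) =>
      let st := ((List.range m).map (fun (t : Nat) => (1 : Int) + (t : Int))).foldl
        (fun (st : String × Int × Int) jj =>
          if (PySem.List.len s : Int) > (i : Int) + jj then
            (st.1 ++ " " ++ PySem.List.pyGetD s ((i : Int) + jj) "", st.2.1 + 1, jj)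
          else (st.1, st.2.1, jj))
        (PySem.List.pyGetD s (i : Int) "", 0, 1)
      if st.2.1 = st.2.2 then new ++ [st.1] else new) acc (List.range L) =
    acc ++ (List.range (min L (s.length - m))).map
      (fun i => ((s.drop (i+1)).take m).foldl (fun a x => a ++ " " ++ x) (s.getD i "")) := by
  induction L generalizing acc with
  | zero => simp
  | succ L ih =>
    rw [List.range_succ, List.foldl_append, ih (by omega)]
    simp only [List.foldl_cons, List.foldl_nil]
    rw [innerA_closed s L m (PySem.List.pyGetD s (L : Int) "")]
    simp only []
    by_cases hc : L + m < s.length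
    · have h1 : min m (s.length - 1 - L) = m := by omega
      have hcond : (((min m (s.length - 1 - L) : Nat)) : Int) = (if m = 0 then (1:Int) else (m:Int)) := by
        rw [h1, if_neg (by omega)]
      rw [if_pos hcond]
      have h2 : min (L+1) (s.length - m) = min L (s.length - m) + 1 := by omega
      rw [h2, List.range_succ, List.map_append]
      have h3 : min L (s.length - m) = L := by omega
      rw [h3, List.append_assoc]
      congr 2
      simp [h1, PySem.List.pyGetD_natCast]
    · have h1 : min m (s.length - 1 - L) = s.length - 1 - L := by omega
      have hcond : ¬ ((((min m (s.length - 1 - L) : Nat)) : Int) = (if m = 0 then (1:Int) else (m:Int))) := by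
        rw [h1, if_neg (by omega)]
        intro hEq
        have : s.length - 1 - L = m := by exact_mod_cast hEq
        omega
      rw [if_neg hcond]
      have h2 : min (L+1) (s.length - m) = min L (s.length - m) := by omega
      rw [h2]

-- A's grams in closed form (n ≥ 2)
lemma gramsA_closed (s : List String) (n : Int) (hn : 2 ≤ n) :
    gramsA s n =
      (List.range (s.length - (n.toNat - 1))).map
        (fun i => ((s.drop (i+1)).take (n.toNat - 1)).foldl (fun a x => a ++ " " ++ x) (s.getD i "")) := by
  have hm : (n - 1).toNat = n.toNat - 1 := by omega
  have hm1 : 1 ≤ n.toNat - 1 := by omega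
  unfold gramsA
  rw [PySem.List.enumerate_eq_map_pyRange s ""]
  simp only [PySem.List.len_eq]
  rw [PySem.List.pyRange_zero_nat, PySem.List.pyRange_one, hm]
  rw [List.foldl_map, List.foldl_map]
  have := outerA_closed s (n.toNat - 1) hm1 s.length (le_refl _) []
  simp only [PySem.List.len_eq] at this
  rw [show min s.length (s.length - (n.toNat - 1)) = s.length - (n.toNat - 1) by omega] at this
  exact this.trans (List.nil_append _)

-- B's grams in closed form (n ≥ 2)
lemma gramsB_closed (s : List String) (n : Int) (hn : 2 ≤ n) :
    gramsB s n =
      (List.range (s.length - (n.toNat - 1))).map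
        (fun t => PySem.Str.join " " ((s.drop t).take n.toNat)) := by
  unfold gramsB
  by_cases hbig : n > PySem.List.len s
  · rw [if_pos (Or.inr hbig)]
    simp only [PySem.List.len_eq] at hbig
    rw [show s.length - (n.toNat - 1) = 0 by omega]
    simp
  · rw [if_neg (by simp only [not_or]; exact ⟨by omega, hbig⟩)]
    rw [show n = ((n.toNat : Nat) : Int) by omega, PySem.List.pyRange_zero_nat, List.map_map]
    have hmap : ((List.range n.toNat).map ((fun i => PySem.List.slice s (some i) none) ∘ (fun (k : Nat) => (k : Int)))) =
        (List.range n.toNat).map (fun i => s.drop i) := by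
      apply List.map_congr_left
      intro i _
      simp [PySem.List.slice_from_natCast]
    rw [hmap, zipAll_drops s n.toNat (by omega)]
    rw [List.map_map]
    rfl

lemma grams_eq (s : List String) (n : Int) (hn : n ≠ 1) : gramsA s n = gramsB s n := by
  by_cases h2 : 2 ≤ n
  · rw [gramsA_closed s n h2, gramsB_closed s n h2]
    apply List.map_congr_left
    intro i hi
    simp only [List.mem_range] at hi
    have hi' : i < s.length := by omega
    rw [join_eq_foldl]
    congr 1
    rw [← List.getElem_cons_drop hi', List.take_cons (by omega)]
    congr 1
    rw [List.getD_eq_getElem?_getD, List.getElem?_eq_getElem hi']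
    rfl
  · have hneg : n ≤ 0 := by omega
    have hA : gramsA s n = [] := by
      unfold gramsA
      rw [PySem.List.pyRange_one_eq_nil (by omega : n ≤ 1)]
      simp
    have hB : gramsB s n = [] := by
      unfold gramsB
      rw [if_pos (Or.inl (by omega))]
    rw [hA, hB]

-- ===== VERDICT (by name: the statement is the Claim_ definition above) =====
theorem transform_grams_spec : Claim_equal_transform_grams := by
  intro references sentence n _
  show _ = _
  unfold transform_grams transform_grams_alt
  by_cases h : n = 1
  · simp [h]
  · have hb : (n == 1) = false := by simpa using h
    simp only [hb, Bool.false_eq_true, if_false]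
    rw [PySem.List.foldl_append_singleton_eq_map]
    simp only [List.nil_append, grams_eq _ _ h]
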